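-- pv_equiv track=rewrite | github.com/martinabaizan/Game-of-life | game_of_life.py | below_neighbours
-- ===== SOURCE A (Python) =====
-- def below_neighbours(board,size,x,y):
--     neighbours = []
--     for x in range(size - 1):
--         for y in range(size):
--             neighbours.append(board[x + 1][y])  # first raw has second raw as below neighbours, etc.
--     neighbours0 = []
--     for i in range(size):
--         neighbours0.append(0) #last raw has no below neighbours (compute as 0)
--     nei = neighbours + neighbours0
--     matrix_below_neighbours = [nei[x:x + size] for x in range(0, len(nei), size)]  # create matrix
--     return matrix_below_neighbours
-- ===== SOURCE B (Python) =====
-- def below_neighbours(board, size, x, y):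
--     # Build the result directly row by row: row i is a copy of board row i+1
--     # (first size entries), and the last row is all zeros — no flattening of
--     # every element into one list and re-chunking as in the original.
--     return [[board[i + 1][j] for j in range(size)] if i < size - 1 else [0] * size
--             for i in range(size)]
-- ===== Notes on version B (the rewrite author's own statement) =====
-- stated objective: simpler
-- what changed: B builds the result matrix directly row by row (row i is a copy of board row i+1 cut to size entries, the last row all zeros) instead of flattening every element with nested index loops into one list and re-chunking it with slices.
import Mathlib
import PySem

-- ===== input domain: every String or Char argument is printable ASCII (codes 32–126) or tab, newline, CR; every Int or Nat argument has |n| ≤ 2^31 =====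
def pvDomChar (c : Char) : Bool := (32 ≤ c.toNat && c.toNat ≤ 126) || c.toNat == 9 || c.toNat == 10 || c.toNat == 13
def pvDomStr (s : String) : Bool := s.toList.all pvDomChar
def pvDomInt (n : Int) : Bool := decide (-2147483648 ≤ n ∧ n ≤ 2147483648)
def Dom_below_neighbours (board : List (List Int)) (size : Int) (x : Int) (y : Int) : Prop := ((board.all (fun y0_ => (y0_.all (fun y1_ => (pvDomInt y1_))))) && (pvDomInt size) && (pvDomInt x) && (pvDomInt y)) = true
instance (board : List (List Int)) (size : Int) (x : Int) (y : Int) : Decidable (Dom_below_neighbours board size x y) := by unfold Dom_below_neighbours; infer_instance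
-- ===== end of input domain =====

-- B builds the result directly row by row (each row a copied slice of the next board row,
-- the last row all zeros) instead of flattening every element and re-chunking; objective: simpler.

-- ===== PORT A =====
def below_neighbours (board : List (List Int)) (size : Int) (x : Int) (y : Int) : List (List Int) :=
  let neighbours : List Int :=
    (PySem.List.pyRange 0 (size - 1) 1).foldl (fun acc x =>
      (PySem.List.pyRange 0 size 1).foldl (fun acc y =>
        acc ++ [PySem.List.pyGetD (PySem.List.pyGetD board (x + 1) []) y 0]) acc) []
  let neighbours0 : List Int :=
    (PySem.List.pyRange 0 size 1).foldl (fun acc _ => acc ++ [(0 : Int)]) []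
  let nei := neighbours ++ neighbours0
  (PySem.List.pyRange 0 (nei.length : Int) size).map
    (fun x => PySem.List.slice nei (some x) (some (x + size)))

-- ===== PORT B =====
def below_neighbours_alt (board : List (List Int)) (size : Int) (x : Int) (y : Int) : List (List Int) :=
  (PySem.List.pyRange 0 size 1).map (fun i =>
    if i < size - 1 then
      (PySem.List.pyRange 0 size 1).map
        (fun j => PySem.List.pyGetD (PySem.List.pyGetD board (i + 1) []) j 0)
    else List.replicate size.toNat 0)

-- ===== PRECONDITION & SPEC =====
-- Pre_ excludes exactly the inputs on which A raises: size = 0 (range(0, 0, 0) is a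
-- ValueError) and positive sizes whose board lacks rows 1..size-1 or whose accessed rows
-- are shorter than size (IndexError).
def Pre_below_neighbours (board : List (List Int)) (size : Int) (x : Int) (y : Int) : Prop :=
  size < 0 ∨
    (1 ≤ size ∧
      ((board.drop 1).take (size.toNat - 1)).length = size.toNat - 1 ∧
      ∀ row ∈ (board.drop 1).take (size.toNat - 1), size ≤ (row.length : Int))
instance (board : List (List Int)) (size : Int) (x : Int) (y : Int) : Decidable (Pre_below_neighbours board size x y) := by unfold Pre_below_neighbours; infer_instance

def pvWitness_below_neighbours : List (List Int) × Int × Int × Int := ([[1, 2], [3, 4]], 2, 0, 0)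

def Spec_below_neighbours (board : List (List Int)) (size : Int) (x : Int) (y : Int) (out : List (List Int)) : Prop := out = below_neighbours_alt board size x y
instance (board : List (List Int)) (size : Int) (x : Int) (y : Int) (out : List (List Int)) : Decidable (Spec_below_neighbours board size x y out) := by unfold Spec_below_neighbours; infer_instance

-- ===== CLAIM (what is proved, stated in full; the proofs are below) =====
def Claim_equal_below_neighbours : Prop := ∀ (board : List (List Int)) (size : Int) (x : Int) (y : Int), Dom_below_neighbours board size x y → Pre_below_neighbours board size x y → Spec_below_neighbours board size x y (below_neighbours board size x y)

-- ===== LEMMAS AND PROOFS =====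

-- inner loop: 'for j in range(size): …append(row[j])' collects the first n elements of row
lemma pv_row_take (row : List Int) (n : Nat) (h : n ≤ row.length) :
    (PySem.List.pyRange 0 (n : Int) 1).map (fun y => PySem.List.pyGetD row y 0) = row.take n := by
  rw [PySem.List.pyRange_one, List.map_map]
  apply List.ext_getElem
  · simp [Nat.min_eq_left h]
  · intro k hk hk'
    have hkn : k < n := by simpa using hk
    have : (0 : Int) + (k : Int) = ((k : Nat) : Int) := by omega
    simp only [List.getElem_map, List.getElem_range, Function.comp_apply, this,
      PySem.List.pyGetD_natCast]
    rw [List.getElem_take, List.getD_eq_getElem _ _ (by omega)]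

-- indexing a list by range over its length reproduces the list
lemma pv_map_getD_range (L : List (List Int)) :
    (List.range L.length).map (fun k => L.getD k []) = L := by
  apply List.ext_getElem
  · simp
  · intro k hk hk'
    simp [List.getD_eq_getElem?_getD, List.getElem?_eq_getElem hk']

-- for k < size-1, the k-th collected row is board row k+1 cut to its first n entries
lemma pv_key (board : List (List Int)) (n : Nat)
    (hlen : ((board.drop 1).take (n - 1)).length = n - 1)
    (hrows : ∀ row ∈ (board.drop 1).take (n - 1), (n : Int) ≤ (row.length : Int)) :
    ∀ k ∈ List.range (n - 1),
      (PySem.List.pyRange 0 (n : Int) 1).map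
          (fun y => PySem.List.pyGetD (PySem.List.pyGetD board ((0 : Int) + (k : Int) + 1) []) y 0)
        = (((board.drop 1).take (n - 1)).map (fun r => r.take n)).getD k [] := by
  intro k hk
  have hkm : k < n - 1 := List.mem_range.mp hk
  have hblen : n - 1 ≤ board.length - 1 := by
    have h := hlen
    rw [List.length_take, List.length_drop] at h
    omega
  have hkb : 1 + k < board.length := by omega
  have hidx : (0 : Int) + (k : Int) + 1 = ((1 + k : Nat) : Int) := by push_cast; ring
  have hrow : PySem.List.pyGetD board ((0 : Int) + (k : Int) + 1) [] = board[1 + k] := by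
    rw [hidx, PySem.List.pyGetD_natCast, List.getD_eq_getElem _ _ hkb]
  have hmem : board[1 + k] ∈ (board.drop 1).take (n - 1) := by
    have hel : ((board.drop 1).take (n - 1))[k] = board[1 + k] := by
      rw [List.getElem_take, List.getElem_drop]
    rw [← hel]
    exact List.getElem_mem _
  have hlenr : n ≤ (board[1 + k]).length := by exact_mod_cast hrows _ hmem
  rw [hrow, pv_row_take _ _ hlenr]
  rw [List.getD_eq_getElem _ _ (by rw [List.length_map, hlen]; omega)]
  simp only [List.getElem_map, List.getElem_take, List.getElem_drop]

-- the double loop 'board[x+1][y]' flattens rows 1..size-1, each cut to its first n entries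
lemma pv_flat (board : List (List Int)) (n : Nat) (hn1 : 1 ≤ n)
    (hlen : ((board.drop 1).take (n - 1)).length = n - 1)
    (hrows : ∀ row ∈ (board.drop 1).take (n - 1), (n : Int) ≤ (row.length : Int)) :
    (PySem.List.pyRange 0 ((n : Int) - 1) 1).flatMap
        (fun x => (PySem.List.pyRange 0 (n : Int) 1).map
          (fun y => PySem.List.pyGetD (PySem.List.pyGetD board (x + 1) []) y 0))
      = (((board.drop 1).take (n - 1)).map (fun r => r.take n)).flatten := by
  set L : List (List Int) := ((board.drop 1).take (n - 1)).map (fun r => r.take n) with hL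
  have hLlen : L.length = n - 1 := by rw [hL, List.length_map, hlen]
  have hrange : PySem.List.pyRange 0 ((n : Int) - 1) 1
      = (List.range (n - 1)).map (fun k : Nat => (0 : Int) + (k : Int)) := by
    have ht : (((n : Int) - 1) - 0).toNat = n - 1 := by omega
    rw [PySem.List.pyRange_one, ht]
  rw [hrange, List.flatMap_map]
  calc (List.range (n - 1)).flatMap
        ((fun x => (PySem.List.pyRange 0 (n : Int) 1).map
          (fun y => PySem.List.pyGetD (PySem.List.pyGetD board (x + 1) []) y 0)) ∘ (fun k : Nat => (0 : Int) + (k : Int)))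
      = (List.range (n - 1)).flatMap (fun k => L.getD k []) := by
        simp only [List.flatMap_def]
        exact congrArg List.flatten (List.map_congr_left (pv_key board n hlen hrows))
    _ = ((List.range L.length).map (fun k => L.getD k [])).flatten := by
        rw [hLlen, List.flatMap_def]
    _ = L.flatten := by rw [pv_map_getD_range]

-- re-chunking the flattened matrix of n-rows gives back the rows
lemma pv_chunk (n : Nat) (hn : 0 < n) :
    ∀ (R : List (List Int)), (∀ r ∈ R, r.length = n) →
      (List.range R.length).map
        (fun k => (R.flatten.drop (n * k)).take n) = R := by
  intro R
  induction R with
  | nil => intro _; simp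
  | cons r R ih =>
    intro h
    have hr : r.length = n := h r (by simp)
    have hR : ∀ r' ∈ R, r'.length = n := fun r' hm => h r' (by simp [hm])
    rw [List.length_cons, List.range_succ_eq_map, List.map_cons, List.map_map]
    congr 1
    · rw [List.flatten_cons]
      simp only [Nat.mul_zero, List.drop_zero]
      rw [← hr, List.take_left]
    · calc List.map _ (List.range R.length)
          = List.map (fun k => (R.flatten.drop (n * k)).take n) (List.range R.length) := by
            apply List.map_congr_left
            intro k hk
            simp only [Function.comp_apply]
            have hm : n * (k + 1) = r.length + n * k := by rw [Nat.mul_succ, hr, Nat.add_comm]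
            rw [List.flatten_cons, hm, List.drop_append]
            rw [List.drop_eq_nil_of_le (by omega : r.length ≤ r.length + n * k)]
            simp
        _ = R := ih hR

theorem below_neighbours_spec : Claim_equal_below_neighbours := by
  intro board size x y _ hpre
  unfold Spec_below_neighbours
  rcases hpre with hneg | ⟨h1, hlen, hrows⟩
  · -- size < 0: every range in A and B is empty, both return []
    unfold below_neighbours below_neighbours_alt
    have e1 : PySem.List.pyRange 0 (size - 1) 1 = [] :=
      PySem.List.pyRange_one_eq_nil (by omega)
    have e2 : PySem.List.pyRange 0 size 1 = [] :=
      PySem.List.pyRange_one_eq_nil (by omega)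
    have e3 : PySem.List.pyRange 0 0 size = [] := by
      unfold PySem.List.pyRange
      split_ifs <;> simp_all
    simp [e1, e2, e3]
  · obtain ⟨n, rfl⟩ : ∃ n : Nat, size = (n : Int) :=
      ⟨size.toNat, (Int.toNat_of_nonneg (by omega)).symm⟩
    simp only [Int.toNat_natCast] at hlen hrows
    have hn1 : 1 ≤ n := by exact_mod_cast h1
    set R : List (List Int) :=
      ((board.drop 1).take (n - 1)).map (fun r => r.take n) ++ [List.replicate n 0] with hRdef
    have hRL : R.length = n := by
      rw [hRdef, List.length_append, List.length_map, hlen, List.length_singleton]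
      omega
    -- B computes R
    have hB : below_neighbours_alt board (n : Int) x y = R := by
      unfold below_neighbours_alt
      apply List.ext_getElem
      · rw [List.length_map, PySem.List.length_pyRange_one, hRL]; omega
      · intro k hk hk'
        rw [List.getElem_map, PySem.List.getElem_pyRange_one]
        have hkl : k < n := by rw [hRL] at hk'; exact hk'
        by_cases hc : k < n - 1
        · rw [if_pos (by omega : (0 : Int) + (k : Int) < (n : Int) - 1)]
          rw [pv_key board n hlen hrows k (List.mem_range.mpr hc)]
          simp only [hRdef]
          rw [List.getElem_append_left (by rw [List.length_map, hlen]; omega)]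
          rw [List.getD_eq_getElem _ _ (by rw [List.length_map, hlen]; omega)]
        · rw [if_neg (by omega : ¬ ((0 : Int) + (k : Int) < (n : Int) - 1)), Int.toNat_natCast]
          have hkeq : k = n - 1 := by omega
          simp only [hRdef]
          rw [List.getElem_append_right (by rw [List.length_map, hlen]; omega)]
          simp [hlen, hkeq]
    -- every row of R has length n
    have hRlen : ∀ r ∈ R, r.length = n := by
      intro r hr
      rcases List.mem_append.mp hr with h | h
      · obtain ⟨r0, hr0, rfl⟩ := List.mem_map.mp h
        have := hrows r0 hr0
        simp only [List.length_take]
        omega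
      · simp only [List.mem_singleton] at h
        subst h; simp
    have hflatlen : R.flatten.length = n * n := by
      rw [List.length_flatten]
      have hrep : R.map List.length = List.replicate R.length n := by
        rw [List.eq_replicate_iff]
        refine ⟨by simp, ?_⟩
        intro b hb
        obtain ⟨r, hr, rfl⟩ := List.mem_map.mp hb
        exact hRlen r hr
      rw [hrep, hRL, List.sum_replicate, smul_eq_mul]
    -- A's flat list nei is R.flatten
    have hnei : (PySem.List.pyRange 0 ((n : Int) - 1) 1).flatMap
          (fun x => (PySem.List.pyRange 0 (n : Int) 1).map
            (fun y => PySem.List.pyGetD (PySem.List.pyGetD board (x + 1) []) y 0))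
        ++ (PySem.List.pyRange 0 (n : Int) 1).map (fun _ => (0 : Int)) = R.flatten := by
      rw [pv_flat board n hn1 hlen hrows]
      have hz : (PySem.List.pyRange 0 (n : Int) 1).map (fun _ => (0 : Int))
          = List.replicate n 0 := by
        have ht : ((n : Int) - 0).toNat = n := by omega
        rw [List.map_const', PySem.List.length_pyRange_one, ht]
      rw [hz, hRdef, List.flatten_append, List.flatten_cons, List.flatten_nil, List.append_nil]
    -- the chunk loop 'range(0, len(nei), size)' has exactly n steps
    have hcount : PySem.List.pyRange 0 ((n * n : Nat) : Int) ((n : Int))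
        = (List.range n).map (fun k : Nat => (0 : Int) + (n : Int) * (k : Int)) := by
      rw [PySem.List.pyRange_of_pos _ _ (by omega : (0 : Int) < (n : Int))]
      have hcnt : (if (0 : Int) < ((n * n : Nat) : Int) then
          ((((n * n : Nat) : Int) - 0 + (n : Int) - 1) / (n : Int)).toNat else 0) = n := by
        rw [if_pos (by exact_mod_cast Nat.mul_pos hn1 hn1)]
        have h2 : ((n * n : Nat) : Int) - 0 + (n : Int) - 1
            = ((n : Int) - 1) + (n : Int) * (n : Int) := by push_cast; ring
        rw [h2, Int.add_mul_ediv_left _ _ (by omega : (n : Int) ≠ 0),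
          Int.ediv_eq_zero_of_lt (by omega) (by omega)]
        omega
      rw [hcnt]
    -- assemble
    unfold below_neighbours
    simp only [PySem.List.foldl_append_singleton_eq_map, PySem.List.foldl_append_eq_flatMap,
      List.nil_append]
    rw [hnei, hB, hflatlen, hcount, List.map_map]
    have hch := pv_chunk n (by omega) R hRlen
    rw [hRL] at hch
    conv_rhs => rw [← hch]
    apply List.map_congr_left
    intro k hk
    simp only [Function.comp_apply]
    have ha : (0 : Int) + (n : Int) * (k : Int) = ((n * k : Nat) : Int) := by push_cast; ring
    rw [ha, show ((n * k : Nat) : Int) + (n : Int) = ((n * k + n : Nat) : Int) by push_cast; ring,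
      PySem.List.slice_natCast]
    congr 1
    omega
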